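-- pv_equiv track=rewrite | github.com/LucasMagnum/coding-challenges | python/daily_interview_pro/20200224.py | solution
-- ===== SOURCE A (Python) =====
-- def solution(string: str) -> str:
--     size = len(string)
--     forces = [0 for _ in range(size)]
--     force = 0
--
--     for i in range(size):
--         if string[i] == "R":
--             force = size
--         elif string[i] == "L":
--             force = 0
--         else:
--             force = max(force - 1, 0)
--
--         forces[i] += force
--
--     force = 0
--     for i in range(size - 1, -1, -1):
--         if string[i] == "L":
--             force = size
--         elif string[i] == "R":
--             force = 0
--         else:
--             force = max(force - 1, 0)
--
--         forces[i] -= force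
--
--     new_string = list(string)
--     for index, force in enumerate(forces):
--         if force == 0:
--             new_string[index] = "."
--         elif force > 0:
--             new_string[index] = "R"
--         else:
--             new_string[index] = "L"
--
--     return "".join(new_string)
-- ===== SOURCE B (Python) =====
-- def _fill(prev: str, nxt: str, gap: int) -> str:
--     # characters strictly between two anchors (virtual 'L' before the string,
--     # virtual 'R' after it)
--     if prev == nxt:
--         return prev * gap
--     if prev == "R" and nxt == "L":
--         half = gap // 2
--         return "R" * half + "." * (gap % 2) + "L" * half
--     return "." * gap
--
--
-- def solution(string: str) -> str:
--     parts = []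
--     prev = "L"          # virtual left anchor
--     run = 0             # pending non-anchor characters
--     for c in string:
--         if c == "R" or c == "L":
--             parts.append(_fill(prev, c, run))
--             parts.append(c)
--             prev, run = c, 0
--         else:
--             run += 1
--     parts.append(_fill(prev, "R", run))
--     return "".join(parts)
-- ===== Notes on version B (the rewrite author's own statement) =====
-- stated objective: faster
-- what changed: Replaced the two whole-string force-superposition scans plus per-index rewrite with a single pass that finds anchor characters ('R'/'L') and fills each gap between consecutive anchors (with virtual L/R boundaries) by a closed-form segment rule using bulk string operations.
import Mathlib
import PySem

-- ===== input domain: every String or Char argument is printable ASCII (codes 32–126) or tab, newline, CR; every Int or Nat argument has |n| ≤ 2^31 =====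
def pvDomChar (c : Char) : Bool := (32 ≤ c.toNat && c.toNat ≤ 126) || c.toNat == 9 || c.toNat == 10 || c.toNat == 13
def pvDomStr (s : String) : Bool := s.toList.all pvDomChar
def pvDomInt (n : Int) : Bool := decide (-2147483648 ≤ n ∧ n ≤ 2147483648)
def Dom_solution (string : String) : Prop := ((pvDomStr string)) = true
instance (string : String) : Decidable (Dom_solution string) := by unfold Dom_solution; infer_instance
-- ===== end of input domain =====

-- B replaces A's two force-superposition scans by one segment-filling pass; measured constant-factor speedup in Python.

-- ===== PORT A =====
-- literal port of A: two force scans writing into a zero list, then a sign rewrite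
def solution (string : String) : String :=
  let s := string.toList
  let size : Int := s.length
  let forces : List Int := (PySem.List.pyRange 0 size 1).map (fun _ => 0)
  let p1 := (PySem.List.pyRange 0 size 1).foldl (fun (st : List Int × Int) i =>
      let forces := st.1
      let force := st.2
      let force := if PySem.List.pyGetD s i ' ' = 'R' then size
        else if PySem.List.pyGetD s i ' ' = 'L' then 0
        else max (force - 1) 0
      (PySem.List.pySetD forces i (PySem.List.pyGetD forces i 0 + force), force)) (forces, 0)
  let forces := p1.1
  let p2 := (PySem.List.pyRange (size - 1) (-1) (-1)).foldl (fun (st : List Int × Int) i =>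
      let forces := st.1
      let force := st.2
      let force := if PySem.List.pyGetD s i ' ' = 'L' then size
        else if PySem.List.pyGetD s i ' ' = 'R' then 0
        else max (force - 1) 0
      (PySem.List.pySetD forces i (PySem.List.pyGetD forces i 0 - force), force)) (forces, 0)
  let forces := p2.1
  let new_string := (PySem.List.enumerate forces 0).foldl (fun (ns : List Char) (p : Int × Int) =>
      if p.2 = 0 then PySem.List.pySetD ns p.1 '.'
      else if p.2 > 0 then PySem.List.pySetD ns p.1 'R'
      else PySem.List.pySetD ns p.1 'L') s
  String.mk new_string

-- ===== PORT B =====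
-- characters strictly between two anchors (virtual 'L' before the string, virtual 'R' after it)
def fillSeg (prev nxt : Char) (gap : Nat) : List Char :=
  if prev = nxt then List.replicate gap prev
  else if prev = 'R' ∧ nxt = 'L' then
    List.replicate (gap / 2) 'R' ++ List.replicate (gap % 2) '.' ++ List.replicate (gap / 2) 'L'
  else List.replicate gap '.'

def solution_alt (string : String) : String :=
  let st := string.toList.foldl (fun (st : List Char × Char × Nat) c =>
      if c = 'R' ∨ c = 'L' then (st.1 ++ fillSeg st.2.1 c st.2.2 ++ [c], c, 0)
      else (st.1, st.2.1, st.2.2 + 1)) ([], 'L', 0)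
  String.mk (st.1 ++ fillSeg st.2.1 'R' st.2.2)

-- ===== PRECONDITION & SPEC =====
def Spec_solution (string : String) (out : String) : Prop := out = solution_alt string
instance (string : String) (out : String) : Decidable (Spec_solution string out) := by unfold Spec_solution; infer_instance

-- ===== CLAIM (what is proved, stated in full; the proofs are below) =====
def Claim_equal_solution : Prop := ∀ (string : String), Dom_solution string → Spec_solution string (solution string)

-- ===== LEMMAS AND PROOFS =====

-- the common reference: left / right domino "distance" scans and a pointwise verdict
def lstep (st : Option Nat) (c : Char) : Option Nat :=
  if c = 'R' then some 0 else if c = 'L' then none else st.map (· + 1)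

def rstep (st : Option Nat) (c : Char) : Option Nat :=
  if c = 'L' then some 0 else if c = 'R' then none else st.map (· + 1)

def leftScan : Option Nat → List Char → List (Option Nat)
  | _, [] => []
  | st, c :: t => lstep st c :: leftScan (lstep st c) t

def rsF : Option Nat → List Char → List (Option Nat) × Option Nat
  | st, [] => ([], st)
  | st, c :: t =>
    let p := rsF st t
    (rstep p.2 c :: p.1, rstep p.2 c)

def specChar : Option Nat → Option Nat → Char
  | none, none => '.'
  | some _, none => 'R'
  | none, some _ => 'L'
  | some a, some b => if a < b then 'R' else if b < a then 'L' else '.'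

def specFrom (σ : Option Nat) (s : List Char) : List Char :=
  List.zipWith specChar (leftScan σ s) (rsF none s).1

-- B's recursion, extracted from the fold
def Bstate : Char → Nat → List Char → List Char
  | prev, run, [] => fillSeg prev 'R' run
  | prev, run, c :: t =>
    if c = 'R' ∨ c = 'L' then fillSeg prev c run ++ c :: Bstate c 0 t
    else Bstate prev (run + 1) t

theorem length_leftScan (σ : Option Nat) (s : List Char) : (leftScan σ s).length = s.length := by
  induction s generalizing σ with
  | nil => rfl
  | cons c t ih => simp [leftScan, ih]

theorem length_rsF (σ : Option Nat) (s : List Char) : (rsF σ s).1.length = s.length := by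
  induction s with
  | nil => rfl
  | cons c t ih => simp [rsF, ih]

theorem leftScan_append (σ : Option Nat) (u v : List Char) :
    leftScan σ (u ++ v) = leftScan σ u ++ leftScan (u.foldl lstep σ) v := by
  induction u generalizing σ with
  | nil => rfl
  | cons c t ih => simp [leftScan, ih, List.foldl]

theorem rsF_append (σ : Option Nat) (u v : List Char) :
    rsF σ (u ++ v) = ((rsF (rsF σ v).2 u).1 ++ (rsF σ v).1, (rsF (rsF σ v).2 u).2) := by
  induction u with
  | nil => simp [rsF]
  | cons c t ih => simp [rsF, ih]
def sigA (prev : Char) : Option Nat := if prev = 'R' then some 0 else none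

theorem map_add_zero (σ : Option Nat) : σ.map (· + 0) = σ := by cases σ <;> rfl

theorem leftScan_replicate (m : Nat) (σ : Option Nat) :
    leftScan σ (List.replicate m '.') = (List.range m).map (fun j => σ.map (· + (j + 1))) := by
  induction m generalizing σ with
  | zero => rfl
  | succ m ih =>
    rw [List.replicate_succ]
    show lstep σ '.' :: leftScan (lstep σ '.') (List.replicate m '.') = _
    have hl : lstep σ '.' = σ.map (· + 1) := by
      simp [lstep]
    rw [hl, ih]
    apply List.ext_getElem
    · simp
    intro k h1 h2
    rcases Nat.eq_zero_or_pos k with hk | hk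
    · subst hk
      cases σ <;> simp
    · obtain ⟨k', rfl⟩ : ∃ k', k = k' + 1 := ⟨k - 1, by omega⟩
      simp only [List.getElem_cons_succ, List.getElem_map, List.getElem_range]
      cases σ <;> simp <;> omega

theorem rsF_replicate (m : Nat) (σ : Option Nat) :
    rsF σ (List.replicate m '.') =
      ((List.range m).map (fun j => σ.map (· + (m - j))), σ.map (· + m)) := by
  induction m with
  | zero => simp [rsF, map_add_zero]
  | succ m ih =>
    rw [List.replicate_succ]
    show (rstep (rsF σ (List.replicate m '.')).2 '.' :: (rsF σ (List.replicate m '.')).1,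
          rstep (rsF σ (List.replicate m '.')).2 '.') = _
    rw [ih]
    have hr : rstep (Option.map (· + m) σ) '.' = σ.map (· + (m + 1)) := by
      cases σ <;> simp [rstep] <;> omega
    simp only [hr]
    refine Prod.ext ?_ rfl
    apply List.ext_getElem
    · simp
    intro k h1 h2
    rcases Nat.eq_zero_or_pos k with hk | hk
    · subst hk
      simp only [List.getElem_cons_zero, List.getElem_map, List.getElem_range]
      cases σ <;> simp
    · obtain ⟨k', rfl⟩ : ∃ k', k = k' + 1 := ⟨k - 1, by omega⟩
      simp only [List.getElem_cons_succ, List.getElem_map, List.getElem_range]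
      cases σ <;> simp <;> omega
def rhoC (c : Char) : Option Nat := if c = 'L' then some 0 else none

-- the gap between anchor `prev` (left) and anchor `c` (right) is filled exactly as fillSeg says
theorem fill_get (prev c : Char) (m k : Nat) (hk : k < m)
    (hp : prev = 'R' ∨ prev = 'L') (hc : c = 'R' ∨ c = 'L') :
    (fillSeg prev c m)[k]'(by
      rcases hp with rfl | rfl <;> rcases hc with rfl | rfl <;>
        simp [fillSeg] <;> omega) =
    specChar ((sigA prev).map (· + (k + 1))) ((rhoC c).map (· + (m - k))) := by
  rcases hp with rfl | rfl <;> rcases hc with rfl | rfl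
  · -- R R
    simp [fillSeg, sigA, rhoC, specChar]
  · -- R L : meet in the middle
    have hf : fillSeg 'R' 'L' m
        = List.replicate (m / 2) 'R' ++ (List.replicate (m % 2) '.' ++ List.replicate (m / 2) 'L') := by
      simp [fillSeg]
    simp only [List.getElem_of_eq hf, sigA, rhoC, specChar]
    norm_num
    by_cases h1 : k < m / 2
    · rw [List.getElem_append_left (by simpa using h1)]
      rw [List.getElem_replicate]
      rw [if_pos (by omega)]
    · rw [List.getElem_append_right (by simpa using h1)]
      by_cases h2 : k - m / 2 < m % 2
      · rw [List.getElem_append_left (by simpa using h2)]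
        rw [List.getElem_replicate]
        rw [if_neg (by omega), if_neg (by omega)]
      · rw [List.getElem_append_right (by simpa using h2)]
        rw [List.getElem_replicate]
        rw [if_neg (by omega), if_pos (by omega)]
  · -- L R
    simp [fillSeg, sigA, rhoC, specChar]
  · -- L L
    simp [fillSeg, sigA, rhoC, specChar]

theorem length_fillSeg (prev c : Char) (m : Nat) (hp : prev = 'R' ∨ prev = 'L')
    (hc : c = 'R' ∨ c = 'L') : (fillSeg prev c m).length = m := by
  rcases hp with rfl | rfl <;> rcases hc with rfl | rfl <;> simp [fillSeg] <;> omega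

-- the filled gap as a zipWith of the scans over the gap
theorem fill_eq_zip (prev c : Char) (m : Nat)
    (hp : prev = 'R' ∨ prev = 'L') (hc : c = 'R' ∨ c = 'L') :
    List.zipWith specChar ((List.range m).map (fun j => (sigA prev).map (· + (j + 1))))
        ((List.range m).map (fun j => (rhoC c).map (· + (m - j)))) = fillSeg prev c m := by
  apply List.ext_getElem
  · simp [length_fillSeg prev c m hp hc]
  intro k h1 h2
  rw [List.getElem_zipWith, List.getElem_map, List.getElem_map, List.getElem_range]
  exact (fill_get prev c m k (by rw [length_fillSeg prev c m hp hc] at h2; exact h2) hp hc).symm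
theorem lstep_anchor (st : Option Nat) (c : Char) (hc : c = 'R' ∨ c = 'L') :
    lstep st c = sigA c := by
  rcases hc with rfl | rfl <;> simp [lstep, sigA]

theorem rstep_anchor (st : Option Nat) (c : Char) (hc : c = 'R' ∨ c = 'L') :
    rstep st c = rhoC c := by
  rcases hc with rfl | rfl <;> simp [rstep, rhoC]

theorem zipWith_map_same {α β γ δ : Type} (f : β → γ → δ) (g : α → β) (h : α → γ)
    (l : List α) : List.zipWith f (l.map g) (l.map h) = l.map (fun x => f (g x) (h x)) := by
  induction l with
  | nil => rfl
  | cons a l ih => simp [ih]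

theorem specFrom_neutral (σ : Option Nat) (u t : List Char) (c : Char)
    (hc : ¬(c = 'R' ∨ c = 'L')) :
    specFrom σ (u ++ c :: t) = specFrom σ (u ++ '.' :: t) := by
  push_neg at hc
  have h1 : ∀ st, lstep st c = lstep st '.' := by
    intro st; simp [lstep, hc.1, hc.2]
  have h2 : ∀ st, rstep st c = rstep st '.' := by
    intro st; simp [rstep, hc.1, hc.2]
  unfold specFrom
  rw [leftScan_append, leftScan_append, rsF_append, rsF_append]
  show List.zipWith specChar (_ ++ leftScan _ (c :: t)) _ =
    List.zipWith specChar (_ ++ leftScan _ ('.' :: t)) _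
  simp only [leftScan, rsF, h1, h2]

theorem Bstate_eq (t : List Char) : ∀ prev run, (prev = 'R' ∨ prev = 'L') →
    Bstate prev run t = specFrom (sigA prev) (List.replicate run '.' ++ t) := by
  induction t with
  | nil =>
    intro prev run hp
    show fillSeg prev 'R' run = _
    rw [List.append_nil]
    unfold specFrom
    rw [leftScan_replicate, rsF_replicate, zipWith_map_same]
    rw [← fill_eq_zip prev 'R' run hp (Or.inl rfl), zipWith_map_same]
    apply List.map_congr_left
    intro j _
    simp [rhoC]
  | cons c t ih =>
    intro prev run hp
    by_cases hc : c = 'R' ∨ c = 'L'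
    · show (if c = 'R' ∨ c = 'L' then fillSeg prev c run ++ c :: Bstate c 0 t
        else Bstate prev (run + 1) t) = _
      rw [if_pos hc]
      have hRHS : specFrom (sigA prev) (List.replicate run '.' ++ c :: t)
          = fillSeg prev c run ++ c :: specFrom (sigA c) t := by
        unfold specFrom
        rw [leftScan_append, rsF_append]
        show List.zipWith specChar
          (leftScan (sigA prev) (List.replicate run '.') ++
            (lstep (List.foldl lstep (sigA prev) (List.replicate run '.')) c ::
              leftScan (lstep (List.foldl lstep (sigA prev) (List.replicate run '.')) c) t))
          ((rsF (rstep (rsF none t).2 c) (List.replicate run '.')).1 ++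
            (rstep (rsF none t).2 c :: (rsF none t).1)) = _
        rw [lstep_anchor _ c hc, rstep_anchor _ c hc, leftScan_replicate, rsF_replicate]
        rw [List.zipWith_append (by simp)]
        rw [zipWith_map_same, ← fill_eq_zip prev c run hp hc, zipWith_map_same]
        simp only [List.zipWith_cons_cons]
        have h3 : specChar (sigA c) (rhoC c) = c := by
          rcases hc with rfl | rfl <;> rfl
        rw [h3]
      rw [hRHS]
      have := ih c 0 hc
      rw [List.replicate_zero, List.nil_append] at this
      rw [this]
    · show (if c = 'R' ∨ c = 'L' then fillSeg prev c run ++ c :: Bstate c 0 t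
        else Bstate prev (run + 1) t) = _
      rw [if_neg hc, ih prev (run + 1) hp, specFrom_neutral _ _ _ _ hc]
      congr 1
      rw [List.replicate_succ']
      simp

-- the fold in solution_alt computes Bstate
theorem foldB (l : List Char) : ∀ (out : List Char) (prev : Char) (run : Nat),
    (let st := l.foldl (fun (st : List Char × Char × Nat) c =>
        if c = 'R' ∨ c = 'L' then (st.1 ++ fillSeg st.2.1 c st.2.2 ++ [c], c, 0)
        else (st.1, st.2.1, st.2.2 + 1)) (out, prev, run);
      st.1 ++ fillSeg st.2.1 'R' st.2.2) = out ++ Bstate prev run l := by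
  induction l with
  | nil => intro out prev run; rfl
  | cons c l ih =>
    intro out prev run
    by_cases hc : c = 'R' ∨ c = 'L'
    · simp only [List.foldl_cons, if_pos hc]
      rw [ih]
      simp [Bstate, hc, List.append_assoc]
    · simp only [List.foldl_cons, if_neg hc]
      rw [ih]
      simp [Bstate, hc]

theorem solution_alt_eq_spec (string : String) :
    solution_alt string = String.mk (specFrom none string.toList) := by
  unfold solution_alt
  have := foldB string.toList [] 'L' 0
  simp only at this ⊢
  rw [this]
  have h0 := Bstate_eq string.toList 'L' 0 (Or.inr rfl)
  rw [List.replicate_zero, List.nil_append] at h0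
  rw [h0]
  have : sigA 'L' = none := by simp [sigA]
  rw [this]
  rfl
-- ===== A side =====
def toF (N : Int) : Option Nat → Int
  | none => 0
  | some d => max (N - d) 0

def sgn (f : Int) : Char := if f = 0 then '.' else if f > 0 then 'R' else 'L'

theorem stepL (N : Int) (hN : 0 ≤ N) (σ : Option Nat) (c : Char) :
    (if c = 'R' then N else if c = 'L' then 0 else max (toF N σ - 1) 0)
      = toF N (lstep σ c) := by
  unfold lstep
  by_cases h1 : c = 'R'
  · simp [h1, toF]; omega
  by_cases h2 : c = 'L'
  · simp [h1, h2, toF]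
  cases σ with
  | none => simp [h1, h2, toF]
  | some d =>
    simp only [if_neg h1, if_neg h2, toF, Option.map_some]
    show max (max (N - ↑d) 0 - 1) 0 = max (N - ↑(d + 1)) 0
    push_cast
    omega

theorem stepR (N : Int) (hN : 0 ≤ N) (σ : Option Nat) (c : Char) :
    (if c = 'L' then N else if c = 'R' then 0 else max (toF N σ - 1) 0)
      = toF N (rstep σ c) := by
  unfold rstep
  by_cases h1 : c = 'L'
  · simp [h1, toF]; omega
  by_cases h2 : c = 'R'
  · simp [h1, h2, toF]
  cases σ with
  | none => simp [h1, h2, toF]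
  | some d =>
    simp only [if_neg h1, if_neg h2, toF, Option.map_some]
    show max (max (N - ↑d) 0 - 1) 0 = max (N - ↑(d + 1)) 0
    push_cast
    omega

theorem zeros_eq (n : Nat) :
    ((PySem.List.pyRange 0 (n : Int) 1).map (fun _ => (0 : Int))) = List.replicate n 0 := by
  rw [List.map_const']
  congr 1
  rw [PySem.List.length_pyRange_one]
  omega
theorem loop1 (s : List Char) : ∀ k, k ≤ s.length →
    ((PySem.List.pyRange 0 (k : Int) 1).foldl (fun (st : List Int × Int) i =>
      let forces := st.1
      let force := st.2
      let force := if PySem.List.pyGetD s i ' ' = 'R' then (s.length : Int)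
        else if PySem.List.pyGetD s i ' ' = 'L' then 0
        else max (force - 1) 0
      (PySem.List.pySetD forces i (PySem.List.pyGetD forces i 0 + force), force))
      (List.replicate s.length 0, 0))
    = ((leftScan none (s.take k)).map (toF (s.length : Int)) ++ List.replicate (s.length - k) 0,
       toF (s.length : Int) (List.foldl lstep none (s.take k))) := by
  intro k hk
  induction k with
  | zero =>
    rw [show ((0:Nat):Int) = 0 by rfl, PySem.List.pyRange_one_eq_nil le_rfl]
    simp [toF, leftScan, List.foldl]
  | succ k ih =>
    have hk' : k ≤ s.length := Nat.le_of_succ_le hk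
    have hkn : k < s.length := hk
    rw [show ((k+1 : Nat):Int) = (k:Int) + 1 by push_cast; ring,
      PySem.List.pyRange_one_succ_right (by positivity), List.foldl_append]
    rw [ih hk']
    simp only [List.foldl_cons, List.foldl_nil]
    have hgetc : PySem.List.pyGetD s (k : Int) ' ' = s[k] := by
      rw [PySem.List.pyGetD_natCast, List.getD_eq_getElem s ' ' hkn]
    have hlenLS : ((leftScan none (s.take k)).map (toF (s.length:Int))).length = k := by
      rw [List.length_map, length_leftScan, List.length_take]
      omega
    have hrep : List.replicate (s.length - k) (0:Int) = 0 :: List.replicate (s.length - (k+1)) 0 := by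
      rw [show s.length - k = (s.length - (k+1)) + 1 by omega, List.replicate_succ]
    have hget0 : PySem.List.pyGetD
        ((leftScan none (s.take k)).map (toF (s.length:Int)) ++ List.replicate (s.length - k) 0) (k:Int) 0
        = 0 := by
      rw [PySem.List.pyGetD_natCast, hrep, List.getD_eq_getElem _ _ (by
        rw [List.length_append, hlenLS]
        simp only [List.length_cons, List.length_replicate]
        omega)]
      rw [List.getElem_append_right (by omega)]
      simp [hlenLS]
    have htake : s.take (k+1) = s.take k ++ [s[k]] := by
      rw [List.take_add_one]
      simp [List.getElem?_eq_getElem hkn]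
    have hstep' : (if PySem.List.pyGetD s (k:Int) ' ' = 'R' then (s.length:Int)
        else if PySem.List.pyGetD s (k:Int) ' ' = 'L' then 0
        else max (toF (s.length:Int) (List.foldl lstep none (s.take k)) - 1) 0)
        = toF (s.length:Int) (List.foldl lstep none (s.take (k+1))) := by
      rw [hgetc, htake, List.foldl_append, List.foldl_cons, List.foldl_nil]
      exact stepL _ (by positivity) _ _
    simp only [hget0, zero_add, hstep']
    refine Prod.ext ?_ ?_
    case succ.refine_2 => rfl
    show PySem.List.pySetD _ (k:Int) _ = _
    rw [PySem.List.pySetD_natCast]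
    rw [hrep, List.set_append_right _ _ (by omega), hlenLS]
    simp only [Nat.sub_self, List.set_cons_zero]
    rw [htake, leftScan_append, List.map_append]
    simp only [List.append_assoc, leftScan, List.map_cons, List.map_nil]
    congr 2
    rw [List.foldl_append, List.foldl_cons, List.foldl_nil]
-- the final forces list
def Fdef (s : List Char) : List Int :=
  List.zipWith (fun a b => toF (s.length : Int) a - toF (s.length : Int) b)
    (leftScan none s) (rsF none s).1

theorem length_Fdef (s : List Char) : (Fdef s).length = s.length := by
  rw [Fdef, List.length_zipWith, length_leftScan, length_rsF]
  omega

theorem rsF_decomp (s : List Char) (k : Nat) :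
    (rsF none s).1 = (rsF (rsF none (s.drop k)).2 (s.take k)).1 ++ (rsF none (s.drop k)).1 := by
  conv_lhs => rw [← List.take_append_drop k s]
  rw [rsF_append]

theorem RS_get' (s : List Char) (k : Nat) (hk : k < s.length) :
    (rsF none s).1[k]? = some ((rsF none (s.drop k)).2) := by
  rw [rsF_decomp s k]
  rw [List.getElem?_append_right (by rw [length_rsF, List.length_take]; omega)]
  rw [show k - (rsF (rsF none (s.drop k)).2 (s.take k)).1.length = 0 by
    rw [length_rsF, List.length_take]; omega]
  rw [List.drop_eq_getElem_cons hk]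
  simp [rsF]

theorem RS_get (s : List Char) (k : Nat) (hk : k < s.length) :
    (rsF none s).1[k]'(by rw [length_rsF]; exact hk) = (rsF none (s.drop k)).2 := by
  have h2 := RS_get' s k hk
  rw [List.getElem?_eq_getElem (by rw [length_rsF]; exact hk)] at h2
  exact Option.some.inj h2

theorem Fdef_get (s : List Char) (k : Nat) (hk : k < s.length) :
    (Fdef s)[k]'(by rw [length_Fdef]; exact hk)
      = toF (s.length : Int) ((leftScan none s)[k]'(by rw [length_leftScan]; exact hk))
        - toF (s.length : Int) ((rsF none s).1[k]'(by rw [length_rsF]; exact hk)) := by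
  simp only [Fdef, List.getElem_zipWith]

theorem loop2 (s : List Char) : ∀ k, k ≤ s.length →
    (((PySem.List.pyRange ((k : Int) - 1) (-1) (-1)).foldl (fun (st : List Int × Int) i =>
      let forces := st.1
      let force := st.2
      let force := if PySem.List.pyGetD s i ' ' = 'L' then (s.length : Int)
        else if PySem.List.pyGetD s i ' ' = 'R' then 0
        else max (force - 1) 0
      (PySem.List.pySetD forces i (PySem.List.pyGetD forces i 0 - force), force))
      (((leftScan none s).map (toF (s.length : Int))).take k ++ (Fdef s).drop k,
        toF (s.length : Int) (rsF none (s.drop k)).2)).1) = Fdef s := by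
  intro k hk
  induction k with
  | zero =>
    rw [show ((0:Nat):Int) - 1 = -1 by rfl, PySem.List.pyRange_neg_one_eq_nil le_rfl]
    simp
  | succ k ih =>
    have hk' : k ≤ s.length := Nat.le_of_succ_le hk
    have hkn : k < s.length := hk
    have hP : ((leftScan none s).map (toF (s.length : Int))).length = s.length := by
      rw [List.length_map, length_leftScan]
    rw [show ((k+1 : Nat):Int) - 1 = (k:Int) by push_cast; ring,
      PySem.List.pyRange_neg_one_cons (by omega), List.foldl_cons]
    have hgetc : PySem.List.pyGetD s (k : Int) ' ' = s[k] := by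
      rw [PySem.List.pyGetD_natCast, List.getD_eq_getElem s ' ' hkn]
    have hdrop := List.drop_eq_getElem_cons (i := k) (l := s) hkn
    have hforce : (if PySem.List.pyGetD s (k:Int) ' ' = 'L' then (s.length : Int)
        else if PySem.List.pyGetD s (k:Int) ' ' = 'R' then 0
        else max (toF (s.length : Int) (rsF none (s.drop (k+1))).2 - 1) 0)
        = toF (s.length : Int) (rsF none (s.drop k)).2 := by
      rw [hgetc, show (rsF none (s.drop k)).2 = rstep (rsF none (s.drop (k+1))).2 s[k] by rw [hdrop]; rfl]
      exact stepR _ (by positivity) _ _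
    have hread : PySem.List.pyGetD
        (((leftScan none s).map (toF (s.length : Int))).take (k+1) ++ (Fdef s).drop (k+1)) (k:Int) 0
        = toF (s.length : Int) ((leftScan none s)[k]'(by rw [length_leftScan]; exact hkn)) := by
      rw [PySem.List.pyGetD_natCast, List.getD_eq_getElem _ _ (by
        rw [List.length_append, List.length_take, hP]; omega)]
      rw [List.getElem_append_left (by rw [List.length_take, hP]; omega)]
      rw [List.getElem_take, List.getElem_map]
    have hwrite : ∀ v : Int,
        ((((leftScan none s).map (toF (s.length : Int))).take (k+1) ++ (Fdef s).drop (k+1)).set k v)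
        = (((leftScan none s).map (toF (s.length : Int))).take k
            ++ v :: (Fdef s).drop (k+1)) := by
      intro v
      have htk : ((leftScan none s).map (toF (s.length : Int))).take (k+1)
          = ((leftScan none s).map (toF (s.length : Int))).take k
            ++ [((leftScan none s).map (toF (s.length : Int)))[k]'(by rw [hP]; exact hkn)] := by
        rw [List.take_add_one, List.getElem?_eq_getElem (by rw [hP]; exact hkn)]
        rfl
      rw [htk, List.append_assoc, List.set_append_right _ _ (by rw [List.length_take, hP]; omega)]
      have h0 : k - (((leftScan none s).map (toF (s.length : Int))).take k).length = 0 := by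
        rw [List.length_take, hP]
        omega
      rw [h0]
      rfl
    show (List.foldl _ (PySem.List.pySetD _ (k:Int) _ , _) _).1 = _
    rw [PySem.List.pySetD_natCast, hforce, hread, hwrite]
    have hFk : toF (s.length : Int) ((leftScan none s)[k]'(by rw [length_leftScan]; exact hkn))
        - toF (s.length : Int) (rsF none (s.drop k)).2
        = (Fdef s)[k]'(by rw [length_Fdef]; exact hkn) := by
      rw [Fdef_get s k hkn, RS_get s k hkn]
    rw [hFk, show ((Fdef s)[k]'(by rw [length_Fdef]; exact hkn) :: (Fdef s).drop (k+1))
        = (Fdef s).drop k from (List.drop_eq_getElem_cons (by rw [length_Fdef]; exact hkn)).symm]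
    exact ih hk'
theorem loop3 (F : List Int) : ∀ (pre rest : List Char), rest.length = F.length →
    ((PySem.List.enumerate F (pre.length : Int)).foldl (fun (ns : List Char) (p : Int × Int) =>
      if p.2 = 0 then PySem.List.pySetD ns p.1 '.'
      else if p.2 > 0 then PySem.List.pySetD ns p.1 'R'
      else PySem.List.pySetD ns p.1 'L') (pre ++ rest))
    = pre ++ F.map sgn := by
  induction F with
  | nil =>
    intro pre rest h
    simp only [List.length_nil] at h
    rw [List.length_eq_zero_iff] at h
    subst h
    simp [PySem.List.enumerate]
  | cons f F ih =>
    intro pre rest h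
    obtain ⟨r0, rest', rfl⟩ : ∃ r0 rest', rest = r0 :: rest' := by
      cases rest with
      | nil => simp at h
      | cons a b => exact ⟨a, b, rfl⟩
    have hcons : PySem.List.enumerate (f :: F) (pre.length : Int)
        = ((pre.length : Int), f) :: PySem.List.enumerate F ((pre.length : Int) + 1) := by
      simp [PySem.List.enumerate]
    rw [hcons, List.foldl_cons]
    have hset : (if f = 0 then PySem.List.pySetD (pre ++ r0 :: rest') (pre.length : Int) '.'
        else if f > 0 then PySem.List.pySetD (pre ++ r0 :: rest') (pre.length : Int) 'R'
        else PySem.List.pySetD (pre ++ r0 :: rest') (pre.length : Int) 'L')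
        = (pre ++ [sgn f]) ++ rest' := by
      have hone : ∀ c : Char, PySem.List.pySetD (pre ++ r0 :: rest') (pre.length : Int) c
          = (pre ++ [c]) ++ rest' := by
        intro c
        rw [PySem.List.pySetD_natCast, List.set_append_right _ _ le_rfl, Nat.sub_self,
          List.set_cons_zero, List.append_assoc, List.singleton_append]
      unfold sgn
      split_ifs <;> apply hone
    rw [hset]
    have hlen : ((pre ++ [sgn f]).length : Int) = (pre.length : Int) + 1 := by
      simp
    have := ih (pre ++ [sgn f]) rest' (by simpa using h)
    rw [hlen] at this
    rw [this]
    simp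

theorem lsBound (s : List Char) : ∀ (σ : Option Nat) (m : Nat),
    (∀ d0, σ = some d0 → d0 + 1 ≤ m) →
    ∀ j d, (leftScan σ s)[j]? = some (some d) → d ≤ m + j := by
  induction s with
  | nil => intro σ m hσ j d h; simp [leftScan] at h
  | cons c t ih =>
    intro σ m hσ j d h
    have hst : ∀ d0, lstep σ c = some d0 → d0 ≤ m := by
      intro d0 h0
      unfold lstep at h0
      split_ifs at h0 with h1 h2
      · simp at h0; omega
      · rw [Option.map_eq_some_iff] at h0
        obtain ⟨d1, hσ1, hd⟩ := h0
        have := hσ d1 hσ1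
        omega
    match j with
    | 0 =>
      rw [show leftScan σ (c :: t) = lstep σ c :: leftScan (lstep σ c) t from rfl] at h
      rw [List.getElem?_cons_zero] at h
      have := hst d (Option.some.inj h)
      omega
    | Nat.succ j =>
      rw [show leftScan σ (c :: t) = lstep σ c :: leftScan (lstep σ c) t from rfl] at h
      rw [List.getElem?_cons_succ] at h
      have := ih (lstep σ c) (m + 1) (fun d0 h0 => by have := hst d0 h0; omega) j d h
      omega

theorem rsFinal (s : List Char) : ∀ d, (rsF none s).2 = some d → d < s.length := by
  induction s with
  | nil => intro d h; simp [rsF] at h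
  | cons c t ih =>
    intro d h
    rw [show (rsF none (c :: t)).2 = rstep (rsF none t).2 c from rfl] at h
    unfold rstep at h
    split_ifs at h with h1 h2
    · simp at h
      simp [← h]
    · rw [Option.map_eq_some_iff] at h
      obtain ⟨d1, hp, hd⟩ := h
      have := ih d1 hp
      simp
      omega

theorem rsBound (s : List Char) : ∀ j d, (rsF none s).1[j]? = some (some d) → d + j < s.length := by
  induction s with
  | nil => intro j d h; simp [rsF] at h
  | cons c t ih =>
    intro j d h
    rw [show (rsF none (c :: t)).1 = rstep (rsF none t).2 c :: (rsF none t).1 from rfl] at h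
    match j with
    | 0 =>
      rw [List.getElem?_cons_zero] at h
      have h' := Option.some.inj h
      unfold rstep at h'
      split_ifs at h' with h1 h2
      · simp at h'
        simp [← h']
      · rw [Option.map_eq_some_iff] at h'
        obtain ⟨d1, hp, hd⟩ := h'
        have := rsFinal t d1 hp
        simp
        omega
    | Nat.succ j =>
      rw [List.getElem?_cons_succ] at h
      have := ih j d h
      simp
      omega
theorem Fmap_eq (s : List Char) : (Fdef s).map sgn = specFrom none s := by
  apply List.ext_getElem
  · rw [List.length_map, length_Fdef]
    unfold specFrom
    rw [List.length_zipWith, length_leftScan, length_rsF]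
    omega
  intro j h1 h2
  have hj : j < s.length := by
    rw [List.length_map, length_Fdef] at h1
    exact h1
  rw [List.getElem_map, Fdef_get s j hj]
  unfold specFrom
  rw [List.getElem_zipWith]
  have hla : (leftScan none s)[j]? = some ((leftScan none s)[j]'(by rw [length_leftScan]; exact hj)) :=
    List.getElem?_eq_getElem _
  have hrb : (rsF none s).1[j]? = some ((rsF none s).1[j]'(by rw [length_rsF]; exact hj)) :=
    List.getElem?_eq_getElem _
  cases ha : (leftScan none s)[j]'(by rw [length_leftScan]; exact hj) with
  | none =>
    cases hb : (rsF none s).1[j]'(by rw [length_rsF]; exact hj) with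
    | none => simp [toF, sgn, specChar]
    | some b =>
      have hbb : b + j < s.length := rsBound s j b (by rw [hrb, hb])
      simp only [toF, sgn, specChar]
      rw [if_neg (by omega), if_neg (by omega)]
  | some a =>
    have haa : a ≤ 0 + j := lsBound s none 0 (by intro d0 h0; simp at h0) j a (by rw [hla, ha])
    cases hb : (rsF none s).1[j]'(by rw [length_rsF]; exact hj) with
    | none =>
      simp only [toF, sgn, specChar]
      rw [if_neg (by omega), if_pos (by omega)]
    | some b =>
      have hbb : b + j < s.length := rsBound s j b (by rw [hrb, hb])
      simp only [toF, sgn, specChar]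
      by_cases hab : a < b
      · rw [if_pos hab, if_neg (by omega), if_pos (by omega)]
      by_cases hba : b < a
      · rw [if_neg hab, if_pos hba, if_neg (by omega), if_neg (by omega)]
      · rw [if_neg hab, if_neg hba, if_pos (by omega)]

theorem solution_eq_spec (string : String) :
    solution string = String.mk (specFrom none string.toList) := by
  unfold solution
  simp only [zeros_eq]
  have h1 := loop1 string.toList string.toList.length le_rfl
  rw [List.take_length] at h1
  simp only [Nat.sub_self, List.replicate_zero, List.append_nil] at h1
  rw [h1]
  have h2 := loop2 string.toList string.toList.length le_rfl
  rw [List.take_of_length_le (by rw [List.length_map, length_leftScan]),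
    List.drop_of_length_le (by rw [length_Fdef]), List.append_nil] at h2
  rw [List.drop_length] at h2
  simp only [rsF, toF] at h2
  have h3 := loop3 (Fdef string.toList) [] string.toList
    (by rw [length_Fdef])
  simp only [List.length_nil, Nat.cast_zero, List.nil_append] at h3
  rw [h2, h3, Fmap_eq]

-- ===== VERDICT (by name: the statement is the Claim_ definition above) =====
theorem solution_spec : Claim_equal_solution := by
  intro string _
  unfold Spec_solution
  rw [solution_eq_spec, solution_alt_eq_spec]
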